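-- pv_equiv track=rewrite | github.com/ElhamDevelopmentStudio/Algorithms | Greedy/BulbProblem.py | bulbOn
-- ===== SOURCE A (Python) =====
-- def bulbOn(arr):
--   count = 0
--   for i in range(len(arr)):
--       if arr[i] == 1:
--           continue
--       elif arr[i] == 0:
--           arr[i] = 1
--           for n in range(i + 1, len(arr)):
--               arr[n] = 1 - arr[n]
--           count += 1
--
--   return count
-- ===== SOURCE B (Python) =====
-- def bulbOn(arr):
--     # Single pass: track flip parity in the count instead of rewriting the suffix.
--     # (Unlike A, does not mutate arr; the return value is identical.)
--     count = 0
--     for v in arr: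
--         if (v if count % 2 == 0 else 1 - v) == 0:
--             count += 1
--     return count
-- ===== Notes on version B (the rewrite author's own statement) =====
-- stated objective: alternative
-- what changed: Replaces A's in-place suffix-rewriting at every zero with a single pass that tracks flip parity in the count and reads each value through that parity (intended as faster in the worst case; measured ~1.6x at the largest size but input-dependent, so not claimed).
import Mathlib
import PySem

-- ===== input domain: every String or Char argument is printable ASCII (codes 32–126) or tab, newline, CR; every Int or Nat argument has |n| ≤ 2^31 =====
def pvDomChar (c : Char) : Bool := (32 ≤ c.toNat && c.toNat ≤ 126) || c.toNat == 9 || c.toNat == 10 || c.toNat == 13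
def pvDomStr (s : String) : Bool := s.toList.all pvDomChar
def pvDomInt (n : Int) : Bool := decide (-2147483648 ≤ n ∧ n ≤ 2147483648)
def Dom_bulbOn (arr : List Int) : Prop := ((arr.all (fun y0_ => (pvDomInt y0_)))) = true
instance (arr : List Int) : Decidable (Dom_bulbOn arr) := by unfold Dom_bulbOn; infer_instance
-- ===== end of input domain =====

-- B makes one pass tracking flip parity in the count instead of rewriting the suffix
-- at every zero; equal return value (A mutates its argument in place, B does not —
-- the claim proved here is about the return value only).

-- ===== PORT A =====
-- inner loop: for n in range(i+1, len(arr)): arr[n] = 1 - arr[n]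
def pvFlipFrom (a : List Int) (j : Nat) : List Int :=
  if h : j < a.length then pvFlipFrom (a.set j (1 - a[j])) (j + 1) else a
termination_by a.length - j
decreasing_by simp only [List.length_set]; exact Nat.sub_succ_lt_self _ _ h

theorem pvFlipFrom_length (a : List Int) (j : Nat) : (pvFlipFrom a j).length = a.length := by
  fun_induction pvFlipFrom with
  | case1 a j h ih => rw [ih]; simp
  | case2 => rfl

-- outer loop: i over range(len(arr)), mutating arr in place
def bulbOnAux (a : List Int) (i : Nat) (count : Int) : Int :=
  if h : i < a.length then
    if a[i] = 1 then bulbOnAux a (i + 1) count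
    else if a[i] = 0 then
      bulbOnAux (pvFlipFrom (a.set i 1) (i + 1)) (i + 1) (count + 1)
    else bulbOnAux a (i + 1) count
  else count
termination_by a.length - i
decreasing_by
  all_goals first
    | exact Nat.sub_succ_lt_self _ _ h
    | (simp only [pvFlipFrom_length, List.length_set]; exact Nat.sub_succ_lt_self _ _ h)

def bulbOn (arr : List Int) : Int := bulbOnAux arr 0 0

-- ===== PORT B =====
def bulbOn_alt (arr : List Int) : Int :=
  arr.foldl (fun count v => if (if count % 2 = 0 then v else 1 - v) = 0 then count + 1 else count) 0

-- ===== PRECONDITION & SPEC =====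
def Spec_bulbOn (arr : List Int) (out : Int) : Prop := out = bulbOn_alt arr
instance (arr : List Int) (out : Int) : Decidable (Spec_bulbOn arr out) := by unfold Spec_bulbOn; infer_instance

-- ===== CLAIM (what is proved, stated in full; the proofs are below) =====
def Claim_equal_bulbOn : Prop := ∀ (arr : List Int), Dom_bulbOn arr → Spec_bulbOn arr (bulbOn arr)

-- ===== LEMMAS AND PROOFS =====

-- A's loop body on the remaining suffix, as a list recursion
def pvBulbList : List Int → Int
  | [] => 0
  | v :: t =>
    if v = 1 then pvBulbList t
    else if v = 0 then 1 + pvBulbList (t.map (fun w => 1 - w))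
    else pvBulbList t
termination_by l => l.length
decreasing_by
  all_goals simp only [List.length_attach, List.length_map, List.length_cons]
  all_goals exact Nat.lt_succ_self _

theorem pvFlipFrom_eq (a : List Int) (j : Nat) :
    pvFlipFrom a j = a.take j ++ (a.drop j).map (fun w => 1 - w) := by
  fun_induction pvFlipFrom with
  | case1 a j h ih =>
      rw [ih, List.take_add_one, List.take_set_of_le (Nat.le_refl j),
        List.drop_set_of_lt (Nat.lt_succ_self j), List.drop_eq_getElem_cons h,
        List.map_cons, List.getElem?_set_self', List.getElem?_eq_getElem h]
      simp
  | case2 a j h =>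
      rw [List.take_of_length_le (by omega), List.drop_of_length_le (by omega)]
      simp

theorem bulbOnAux_eq (a : List Int) (i : Nat) (c : Int) :
    bulbOnAux a i c = c + pvBulbList (a.drop i) := by
  fun_induction bulbOnAux with
  | case4 a i c h =>
      rw [List.drop_of_length_le (by omega), pvBulbList]
      ring
  | case1 a i c h h1 ih =>
      rw [ih, List.drop_eq_getElem_cons h, pvBulbList, if_pos h1]
  | case3 a i c h h1 h0 ih =>
      rw [ih, List.drop_eq_getElem_cons h, pvBulbList, if_neg h1, if_neg h0]
  | case2 a i c h h1 h0 ih =>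
      rw [ih, List.drop_eq_getElem_cons h, pvBulbList, if_neg h1, if_pos h0]
      have hdrop : (pvFlipFrom (a.set i 1) (i + 1)).drop (i + 1)
          = (a.drop (i + 1)).map (fun w => 1 - w) := by
        rw [pvFlipFrom_eq, List.drop_left' (by simp; omega),
          List.drop_set_of_lt (Nat.lt_succ_self i)]
      rw [hdrop]
      ring

-- B's fold step
def pvStep (count v : Int) : Int :=
  if (if count % 2 = 0 then v else 1 - v) = 0 then count + 1 else count

theorem pvFold_flip (l : List Int) (c : Int) :
    List.foldl pvStep (c + 1) l = List.foldl pvStep c (l.map (fun w => 1 - w)) + 1 := by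
  induction l generalizing c with
  | nil => simp
  | cons v t ih =>
      simp only [List.foldl_cons, List.map_cons, pvStep]
      have hpar : ((c + 1) % 2 = 0) ↔ ¬ (c % 2 = 0) := by omega
      have harg : (if (c + 1) % 2 = 0 then v else 1 - v)
          = (if c % 2 = 0 then 1 - v else 1 - (1 - v)) := by
        by_cases hc : c % 2 = 0 <;> simp [hc, hpar.mpr, hpar]
      rw [harg]
      have : (1 - (1 - v)) = v := by ring
      rw [this]
      by_cases ht : (if c % 2 = 0 then 1 - v else v) = 0
      · rw [if_pos ht, if_pos ht]; exact ih (c + 1)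
      · rw [if_neg ht, if_neg ht]; exact ih c

theorem pvBulbList_eq_fold_n (n : Nat) :
    ∀ l : List Int, l.length ≤ n → pvBulbList l = List.foldl pvStep 0 l := by
  induction n with
  | zero =>
      intro l hl
      have hnil : l = [] := List.length_eq_zero_iff.mp (by omega)
      subst hnil
      simp [pvBulbList]
  | succ n ih =>
      intro l hl
      match l with
      | [] => simp [pvBulbList]
      | v :: t =>
        rw [pvBulbList, List.foldl_cons]
        simp only [pvStep]
        norm_num
        by_cases h1 : v = 1
        · simp [h1, show ¬ ((1:Int) = 0) by omega]
          exact ih t (by simpa using hl)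
        · by_cases h0 : v = 0
          · simp [h0]
            rw [ih (t.map (fun w => 1 - w)) (by simpa using hl)]
            have hf := pvFold_flip t 0
            norm_num at hf
            linarith
          · simp [h1, h0]
            exact ih t (by simpa using hl)

-- ===== VERDICT (by name: the statement is the Claim_ definition above) =====
theorem bulbOn_spec : Claim_equal_bulbOn := by
  intro arr _
  unfold Spec_bulbOn bulbOn bulbOn_alt
  rw [bulbOnAux_eq, List.drop_zero,
    pvBulbList_eq_fold_n arr.length arr (Nat.le_refl _)]
  have : (fun (count v : Int) => if (if count % 2 = 0 then v else 1 - v) = 0 then count + 1 else count) = pvStep := rfl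
  rw [this]
  ring
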